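-- pv_equiv track=rewrite | github.com/JMcunst/Baekjoon-Algo | skict/no1_2nd.py | solution
-- ===== SOURCE A (Python) =====
-- from collections import Counter
--
-- def solution(goods):
--     answer = []
--     primary_dict = {}
--     answer_dict = {}
--     part_list = []
--
--     for good in goods:
--         primary_dict[good] = []
--         my_list = []
--
--         for i in range(len(good)):
--             k = i+1
--             while k <= len(good):
--                 if good[i:k] not in my_list:
--                     my_list.append(good[i:k])
--                 primary_dict[good].append(good[i:k])
--                 k += 1
--         part_list += my_list
--
--     counter = Counter(part_list)
--
--     for good, value in primary_dict.items():
--         answer_dict[good] = []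
--         flag = True
--         length = -1
--         value.sort(key=len)
--         for i in range(len(value)):
--             if flag:
--                 if counter[value[i]] == 1:
--                     length = len(value[i])
--                     flag = False
--                     answer_dict[good].append(value[i])
--             else:
--                 if counter[value[i]] == 1 and len(value[i]) == length:
--                     answer_dict[good].append(value[i])
--
--     for good, words in answer_dict.items():
--         if words:
--             fw = list(set(words))
--             fw.sort()
--             for i, word in enumerate(fw):
--                 if i == 0:
--                     st = word
--                 else:
--                     st += ' '+word
--             answer.append(st)
--         else:
--             answer.append('None')
--             continue
--     return answer
-- ===== SOURCE B (Python) =====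
-- def solution(goods):
--     # No global substring counter: per distinct good, search lengths ascending and
--     # test each candidate directly with Python's substring containment over the
--     # raw goods list (duplicates count), stopping at the first successful length.
--     answer = []
--     for good in dict.fromkeys(goods):
--         n = len(good)
--         result = 'None'
--         for L in range(1, n + 1):
--             uniq = {good[i:i + L] for i in range(n - L + 1)
--                     if sum(1 for h in goods if good[i:i + L] in h) == 1}
--             if uniq:
--                 result = ' '.join(sorted(uniq))
--                 break
--         answer.append(result)
--     return answer
-- ===== Notes on version B (the rewrite author's own statement) =====
-- stated objective: simpler
-- what changed: B drops A's global precomputation (per-good substring lists, the Counter of all deduped substrings, the length-sort and flag/length scan) entirely: per distinct good it searches lengths ascending with an early break and decides each candidate on the spot by counting, with direct substring containment 's in h', how many raw goods entries contain it; B trades speed on large inputs for this much shorter direct search.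
import Mathlib
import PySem

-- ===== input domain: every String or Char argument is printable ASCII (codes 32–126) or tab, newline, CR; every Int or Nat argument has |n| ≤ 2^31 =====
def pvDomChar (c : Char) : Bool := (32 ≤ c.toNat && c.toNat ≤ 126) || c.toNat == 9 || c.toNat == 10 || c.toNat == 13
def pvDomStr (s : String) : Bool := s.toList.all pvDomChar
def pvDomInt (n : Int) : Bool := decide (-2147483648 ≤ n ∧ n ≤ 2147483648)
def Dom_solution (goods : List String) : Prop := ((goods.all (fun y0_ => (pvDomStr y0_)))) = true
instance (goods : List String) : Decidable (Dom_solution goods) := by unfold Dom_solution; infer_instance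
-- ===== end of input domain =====

-- B drops A's global precomputation (per-good substring lists, Counter, length-sort, flag scan):
-- per distinct good it searches lengths ascending with early break, deciding each candidate by a
-- direct substring-containment count over the raw goods list (alternative; return value only).

-- ===== PORT A =====
def solution (goods : List String) : List String :=
  let first := goods.foldl
    (fun (st : PySem.Dict String (List String) × List String) good =>
      let inner := (PySem.List.pyRange 0 (PySem.Str.len good)).foldl
        (fun (st2 : PySem.Dict String (List String) × List String) i =>
          (PySem.List.pyRange (i + 1) (PySem.Str.len good + 1)).foldl
            (fun (st3 : PySem.Dict String (List String) × List String) k =>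
              (st3.1.modify good [] (fun v => v ++ [PySem.Str.slice good (some i) (some k)]),
               if st3.2.contains (PySem.Str.slice good (some i) (some k)) then st3.2
               else st3.2 ++ [PySem.Str.slice good (some i) (some k)]))
            st2)
        (st.1.insert good [], [])
      (inner.1, st.2 ++ inner.2))
    (PySem.Dict.empty, [])
  let counter := PySem.Dict.counter first.2
  let answer_dict := first.1.items.foldl
    (fun (ad : PySem.Dict String (List String)) gv =>
      let value := PySem.List.sorted gv.2 (fun s => PySem.Str.len s)
      let scan := (PySem.List.pyRange 0 (value.length : Int)).foldl
        (fun (st : PySem.Dict String (List String) × Bool × Int) i =>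
          let v := PySem.List.pyGetD value i ""
          if st.2.1 then
            if counter.getD v 0 == 1 then
              (st.1.modify gv.1 [] (fun w => w ++ [v]), false, PySem.Str.len v)
            else st
          else
            if counter.getD v 0 == 1 && PySem.Str.len v == st.2.2 then
              (st.1.modify gv.1 [] (fun w => w ++ [v]), st.2.1, st.2.2)
            else st)
        (ad.insert gv.1 [], true, -1)
      scan.1)
    PySem.Dict.empty
  answer_dict.items.foldl
    (fun (answer : List String) gw =>
      if gw.2.isEmpty then answer ++ ["None"]
      else
        let fw := PySem.List.sorted (PySem.Set.ofList gw.2) (fun x => x)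
        answer ++ [(PySem.List.enumerate fw).foldl
          (fun s iw => if iw.1 == 0 then iw.2 else s ++ " " ++ iw.2) ""])
    []

-- ===== PORT B =====
def solution_alt (goods : List String) : List String :=
  (PySem.List.dedup goods).foldl
    (fun answer good =>
      let n := PySem.Str.len good
      answer ++ [((PySem.List.pyRange 1 (n + 1)).foldl
        (fun (st : String × Bool) L =>
          if st.2 then st
          else
            let uniq := (PySem.List.pyRange 0 (n - L + 1)).foldl
              (fun se i =>
                if (goods.foldl (fun acc h =>
                      if PySem.Str.isIn (PySem.Str.slice good (some i) (some (i + L))) h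
                      then acc + 1 else acc) (0 : Int)) == 1 then
                  PySem.Set.add se (PySem.Str.slice good (some i) (some (i + L)))
                else se)
              PySem.Set.empty
            if uniq.isEmpty then st
            else (PySem.Str.join " " (PySem.List.sorted uniq (fun x => x)), true))
        ("None", false)).1])
    []

-- ===== PRECONDITION & SPEC =====
def Spec_solution (goods : List String) (out : List String) : Prop := out = solution_alt goods
instance (goods : List String) (out : List String) : Decidable (Spec_solution goods out) := by unfold Spec_solution; infer_instance

-- ===== CLAIM (what is proved, stated in full; the proofs are below) =====
def Claim_equal_solution : Prop := ∀ (goods : List String), Dom_solution goods → Spec_solution goods (solution goods)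

-- ===== LEMMAS AND PROOFS =====

-- ---- math layer ----

def subsAll (g : String) : List String :=
  (PySem.List.pyRange 0 (PySem.Str.len g)).flatMap
    (fun i => (PySem.List.pyRange (i + 1) (PySem.Str.len g + 1)).map
      (fun k => PySem.Str.slice g (some i) (some k)))

def subsLen (g : String) (L : Int) : List String :=
  (PySem.List.pyRange 0 (PySem.Str.len g - L + 1)).map
    (fun i => PySem.Str.slice g (some i) (some (i + L)))

def partList (goods : List String) : List String :=
  goods.flatMap (fun g => PySem.Set.ofList (subsAll g))

def scanList (c : String → Int) : Bool → Int → List String → List String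
  | _, _, [] => []
  | true, L, v :: r =>
      if c v == 1 then v :: scanList c false (PySem.Str.len v) r else scanList c true L r
  | false, L, v :: r =>
      if c v == 1 && PySem.Str.len v == L then v :: scanList c false L r else scanList c false L r

def wsA (c : String → Int) (g : String) : List String :=
  scanList c true (-1) (PySem.List.sorted (subsAll g) (fun s => PySem.Str.len s))

def renderA (ws : List String) : String :=
  if ws.isEmpty then "None"
  else PySem.Str.join " " (PySem.List.sorted (PySem.Set.ofList ws) (fun x => x))

def cOf (goods : List String) : String → Int :=
  fun s => (PySem.Dict.counter (partList goods)).getD s 0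

def cAlt (goods : List String) : String → Int :=
  fun s => goods.foldl (fun acc h => if PySem.Str.isIn s h then acc + 1 else acc) 0

def uniqList (c : String → Int) (g : String) (L : Int) : List String :=
  (PySem.List.pyRange 0 (PySem.Str.len g - L + 1)).foldl
    (fun se i =>
      if c (PySem.Str.slice g (some i) (some (i + L))) == 1 then
        PySem.Set.add se (PySem.Str.slice g (some i) (some (i + L)))
      else se)
    PySem.Set.empty

def searchBody (c : String → Int) (g : String) (st : String × Bool) (L : Int) : String × Bool :=
  if st.2 then st
  else if (uniqList c g L).isEmpty then st
  else (PySem.Str.join " " (PySem.List.sorted (uniqList c g L) (fun x => x)), true)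

def searchB (c : String → Int) (g : String) : String :=
  ((PySem.List.pyRange 1 (PySem.Str.len g + 1)).foldl (searchBody c g) ("None", false)).1

-- ---- small set helpers ----

lemma set_add_of_mem {S : PySem.Set String} {x : String} (h : x ∈ S) :
    PySem.Set.add S x = S := by
  simp [PySem.Set.add, PySem.Set.contains, h]

lemma set_add_of_not_mem {S : PySem.Set String} {x : String} (h : x ∉ S) :
    PySem.Set.add S x = S ++ [x] := by
  simp [PySem.Set.add, PySem.Set.contains, h]

lemma update_of_mem (l : List String) (S : PySem.Set String)
    (h : ∀ x ∈ l, x ∈ S) : PySem.Set.update S l = S := by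
  induction l generalizing S with
  | nil => rfl
  | cons x t ih =>
    have hs : PySem.Set.update S (x :: t) = PySem.Set.update (PySem.Set.add S x) t := rfl
    rw [hs, set_add_of_mem (h x (by simp))]
    exact ih S (fun y hy => h y (List.mem_cons_of_mem _ hy))

lemma foldl_add_disjoint : ∀ (t : List String) (S : PySem.Set String), t.Nodup →
    (∀ x ∈ t, x ∉ S) → t.foldl PySem.Set.add S = S ++ t := by
  intro t
  induction t with
  | nil => intro S _ _; simp
  | cons x r ih =>
    intro S hnd hdis
    have hx : x ∉ S := hdis x (by simp)
    simp only [List.foldl_cons, set_add_of_not_mem hx]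
    rw [ih (S ++ [x]) (List.Nodup.of_cons hnd)]
    · simp
    · intro y hy
      simp only [List.mem_append, List.mem_singleton]
      rintro (hS | rfl)
      · exact hdis y (List.mem_cons_of_mem _ hy) hS
      · exact (List.nodup_cons.1 hnd).1 hy

lemma ofList_eq_self {l : List String} (h : l.Nodup) : PySem.Set.ofList l = l := by
  rw [PySem.Set.ofList_eq_foldl]
  simpa using foldl_add_disjoint l [] h (by simp)

-- ---- dict bookkeeping layer ----

def modStep (k : String) (d : PySem.Dict String (List String)) (ws : List String) :
    PySem.Dict String (List String) :=
  ws.foldl (fun d s => d.modify k [] (fun v => v ++ [s])) d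

def kvStep {α : Type} (keyf : α → String) (valf : α → List String)
    (d : PySem.Dict String (List String)) (a : α) : PySem.Dict String (List String) :=
  modStep (keyf a) (d.insert (keyf a) []) (valf a)

lemma getD_modStep (k : String) (d : PySem.Dict String (List String)) (ws : List String) (c : String) :
    (modStep k d ws).getD c [] = if c = k then d.getD k [] ++ ws else d.getD c [] := by
  unfold modStep
  rw [show (ws.foldl (fun d s => d.modify k [] (fun v => v ++ [s])) d)
      = ((ws.map (fun s => (k, s))).foldl (fun d p => d.modify p.1 [] (fun v => v ++ [p.2])) d) by
    rw [List.foldl_map]]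
  rw [PySem.Dict.getD_foldl_modify_append, List.filter_map]
  by_cases h : c = k
  · subst h
    simp [Function.comp_def]
  · have hkc : ((fun p : String × String => p.1 == c) ∘ (fun s => (k, s))) = fun _ => false := by
      funext s
      simp only [Function.comp_def]
      exact beq_eq_false_iff_ne.2 (fun e => h e.symm)
    simp [hkc, h]

lemma keys_modStep (k : String) (d : PySem.Dict String (List String)) (ws : List String)
    (hk : k ∈ d.keys) : (modStep k d ws).keys = d.keys := by
  unfold modStep
  rw [PySem.Dict.keys_foldl_modify_key ws (fun _ => k) [] (fun _ s => (fun v => v ++ [s]))]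
  exact update_of_mem _ _ (by intro x hx; simp at hx; rcases hx with ⟨-, rfl⟩; exact hk)

lemma keys_insert' (d : PySem.Dict String (List String)) (k : String) (v : List String) :
    (d.insert k v).keys = PySem.Set.add d.keys k := by
  by_cases h : d.contains k = true
  · have hk : k ∈ d.keys := by
      have := PySem.Dict.contains_eq_decide_mem_keys d k
      rw [h] at this
      exact of_decide_eq_true this.symm
    rw [set_add_of_mem hk]
    show ((d.insert k v).items.map Prod.fst) = d.items.map Prod.fst
    rw [PySem.Dict.items_insert, if_pos h, List.map_map]
    apply List.map_congr_left
    intro p _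
    by_cases hp : p.1 = k
    · simp [hp]
    · simp [hp]
  · have hk : k ∉ d.keys := by
      intro hmem
      have := PySem.Dict.contains_eq_decide_mem_keys d k
      rw [decide_eq_true hmem] at this
      exact h this
    rw [set_add_of_not_mem hk]
    show ((d.insert k v).items.map Prod.fst) = d.items.map Prod.fst ++ [k]
    rw [PySem.Dict.items_insert, if_neg h, List.map_append]
    rfl

lemma keys_kvStep {α : Type} (keyf : α → String) (valf : α → List String)
    (d : PySem.Dict String (List String)) (a : α) :
    (kvStep keyf valf d a).keys = PySem.Set.add d.keys (keyf a) := by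
  unfold kvStep
  rw [keys_modStep _ _ _ (by rw [keys_insert']; exact (PySem.Set.mem_add _ _ _).2 (Or.inr rfl)),
      keys_insert']

lemma getD_kvStep {α : Type} (keyf : α → String) (valf : α → List String)
    (d : PySem.Dict String (List String)) (a : α) (c : String) :
    (kvStep keyf valf d a).getD c [] = if c = keyf a then valf a else d.getD c [] := by
  unfold kvStep
  rw [getD_modStep]
  by_cases h : c = keyf a
  · simp [h]
  · simp [h, PySem.Dict.getD_insert]

lemma loop_keys {α : Type} (keyf : α → String) (valf : α → List String)
    (xs : List α) (d : PySem.Dict String (List String)) :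
    (xs.foldl (kvStep keyf valf) d).keys = PySem.Set.update d.keys (xs.map keyf) := by
  induction xs generalizing d with
  | nil => rfl
  | cons x t ih =>
    simp only [List.foldl_cons, List.map_cons]
    rw [ih, keys_kvStep]
    rfl

lemma loop_getD_nomem {α : Type} (keyf : α → String) (valf : α → List String)
    (xs : List α) (d : PySem.Dict String (List String)) (c : String)
    (h : ∀ a ∈ xs, keyf a ≠ c) :
    (xs.foldl (kvStep keyf valf) d).getD c [] = d.getD c [] := by
  induction xs generalizing d with
  | nil => rfl
  | cons x t ih =>
    simp only [List.foldl_cons]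
    rw [ih _ (fun a ha => h a (List.mem_cons_of_mem _ ha)), getD_kvStep,
        if_neg (fun e => h x (by simp) e.symm)]

lemma loop_getD_mem {α : Type} (keyf : α → String) (vfun : String → List String)
    (xs : List α) (d : PySem.Dict String (List String)) (c : String)
    (h : c ∈ xs.map keyf) :
    (xs.foldl (kvStep keyf (fun a => vfun (keyf a))) d).getD c [] = vfun c := by
  induction xs generalizing d with
  | nil => simp at h
  | cons x t ih =>
    simp only [List.foldl_cons]
    by_cases hc : c ∈ t.map keyf
    · exact ih _ hc
    · have hcx : c = keyf x := by
        rcases List.mem_map.1 h with ⟨a, ha, rfl⟩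
        rcases List.mem_cons.1 ha with rfl | ha'
        · rfl
        · exact absurd (List.mem_map_of_mem ha') hc
      have hnot : ∀ a ∈ t, keyf a ≠ c := by
        intro a ha e
        exact hc (e ▸ List.mem_map_of_mem ha)
      rw [loop_getD_nomem _ _ _ _ _ hnot, getD_kvStep, if_pos hcx, hcx]

-- ---- port A restructuring ----

lemma inner2_split (good : String) (i : Int) (ks : List Int) :
    ∀ (pd : PySem.Dict String (List String)) (ml : List String),
    ks.foldl
      (fun (st3 : PySem.Dict String (List String) × List String) k =>
        (st3.1.modify good [] (fun v => v ++ [PySem.Str.slice good (some i) (some k)]),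
         if st3.2.contains (PySem.Str.slice good (some i) (some k)) then st3.2
         else st3.2 ++ [PySem.Str.slice good (some i) (some k)]))
      (pd, ml)
    = (ks.foldl (fun pd k => pd.modify good [] (fun v => v ++ [PySem.Str.slice good (some i) (some k)])) pd,
       ks.foldl (fun ml k => if ml.contains (PySem.Str.slice good (some i) (some k)) then ml
                 else ml ++ [PySem.Str.slice good (some i) (some k)]) ml) := by
  induction ks with
  | nil => intro pd ml; rfl
  | cons k t ih => intro pd ml; simp only [List.foldl_cons]; exact ih _ _

lemma inner1_split (good : String) (is : List Int) :
    ∀ (pd : PySem.Dict String (List String)) (ml : List String),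
    is.foldl
      (fun (st2 : PySem.Dict String (List String) × List String) i =>
        (PySem.List.pyRange (i + 1) (PySem.Str.len good + 1)).foldl
          (fun (st3 : PySem.Dict String (List String) × List String) k =>
            (st3.1.modify good [] (fun v => v ++ [PySem.Str.slice good (some i) (some k)]),
             if st3.2.contains (PySem.Str.slice good (some i) (some k)) then st3.2
             else st3.2 ++ [PySem.Str.slice good (some i) (some k)]))
          st2)
      (pd, ml)
    = (is.foldl (fun pd i => (PySem.List.pyRange (i + 1) (PySem.Str.len good + 1)).foldl
         (fun pd k => pd.modify good [] (fun v => v ++ [PySem.Str.slice good (some i) (some k)])) pd) pd,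
       is.foldl (fun ml i => (PySem.List.pyRange (i + 1) (PySem.Str.len good + 1)).foldl
         (fun ml k => if ml.contains (PySem.Str.slice good (some i) (some k)) then ml
                      else ml ++ [PySem.Str.slice good (some i) (some k)]) ml) ml) := by
  induction is with
  | nil => intro pd ml; rfl
  | cons i t ih =>
    intro pd ml
    simp only [List.foldl_cons]
    rw [inner2_split]
    exact ih _ _

lemma pd_inner_eq (good : String) (pd : PySem.Dict String (List String)) :
    (PySem.List.pyRange 0 (PySem.Str.len good)).foldl
      (fun pd i => (PySem.List.pyRange (i + 1) (PySem.Str.len good + 1)).foldl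
        (fun pd k => pd.modify good [] (fun v => v ++ [PySem.Str.slice good (some i) (some k)])) pd)
      pd = modStep good pd (subsAll good) := by
  unfold modStep subsAll
  rw [List.foldl_flatMap]
  simp only [List.foldl_map]

lemma ml_inner_eq (good : String) :
    (PySem.List.pyRange 0 (PySem.Str.len good)).foldl
      (fun ml i => (PySem.List.pyRange (i + 1) (PySem.Str.len good + 1)).foldl
        (fun ml k => if ml.contains (PySem.Str.slice good (some i) (some k)) then ml
                     else ml ++ [PySem.Str.slice good (some i) (some k)]) ml)
      [] = PySem.Set.ofList (subsAll good) := by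
  have hadd : ∀ (ml : List String) (s : String),
      (if ml.contains s then ml else ml ++ [s]) = PySem.Set.add ml s := by
    intro ml s
    by_cases h : s ∈ ml
    · rw [set_add_of_mem h, if_pos (by simpa using h)]
    · rw [set_add_of_not_mem h, if_neg (by simpa using h)]
  rw [PySem.Set.ofList_eq_foldl]
  unfold subsAll
  rw [List.foldl_flatMap]
  simp only [List.foldl_map, hadd]

lemma outer_split (goods : List String) :
    ∀ (pd : PySem.Dict String (List String)) (acc : List String),
    goods.foldl
      (fun (st : PySem.Dict String (List String) × List String) good =>
        (((PySem.List.pyRange 0 (PySem.Str.len good)).foldl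
          (fun (st2 : PySem.Dict String (List String) × List String) i =>
            (PySem.List.pyRange (i + 1) (PySem.Str.len good + 1)).foldl
              (fun (st3 : PySem.Dict String (List String) × List String) k =>
                (st3.1.modify good [] (fun v => v ++ [PySem.Str.slice good (some i) (some k)]),
                 if st3.2.contains (PySem.Str.slice good (some i) (some k)) then st3.2
                 else st3.2 ++ [PySem.Str.slice good (some i) (some k)]))
              st2)
          (st.1.insert good [], [])).1,
         st.2 ++ ((PySem.List.pyRange 0 (PySem.Str.len good)).foldl
          (fun (st2 : PySem.Dict String (List String) × List String) i =>
            (PySem.List.pyRange (i + 1) (PySem.Str.len good + 1)).foldl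
              (fun (st3 : PySem.Dict String (List String) × List String) k =>
                (st3.1.modify good [] (fun v => v ++ [PySem.Str.slice good (some i) (some k)]),
                 if st3.2.contains (PySem.Str.slice good (some i) (some k)) then st3.2
                 else st3.2 ++ [PySem.Str.slice good (some i) (some k)]))
              st2)
          (st.1.insert good [], [])).2))
      (pd, acc)
    = (goods.foldl (kvStep (fun g => g) subsAll) pd,
       acc ++ goods.flatMap (fun g => PySem.Set.ofList (subsAll g))) := by
  induction goods with
  | nil => intro pd acc; simp
  | cons g t ih =>
    intro pd acc
    simp only [List.foldl_cons]
    rw [inner1_split]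
    simp only [pd_inner_eq, ml_inner_eq]
    rw [ih]
    simp [kvStep, List.flatMap_cons, List.append_assoc]

lemma scan_fold_eq (cd : PySem.Dict String Int) (g : String) (value : List String) :
    ∀ (fl : Bool) (L : Int) (ad : PySem.Dict String (List String)),
    (value.foldl
      (fun (st : PySem.Dict String (List String) × Bool × Int) v =>
        if st.2.1 then
          if cd.getD v 0 == 1 then (st.1.modify g [] (fun w => w ++ [v]), false, PySem.Str.len v)
          else st
        else
          if cd.getD v 0 == 1 && PySem.Str.len v == st.2.2 then
            (st.1.modify g [] (fun w => w ++ [v]), st.2.1, st.2.2)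
          else st)
      (ad, fl, L)).1 = modStep g ad (scanList (fun s => cd.getD s 0) fl L value) := by
  induction value with
  | nil => intro fl L ad; rfl
  | cons v r ih =>
    intro fl L ad
    simp only [List.foldl_cons]
    cases fl with
    | true =>
      by_cases h : (cd.getD v 0 == 1) = true
      · simp only [scanList, h, if_true]
        exact ih false (PySem.Str.len v) _
      · simp only [Bool.not_eq_true] at h
        simp only [scanList, h, if_true, if_false, Bool.false_eq_true]
        exact ih true L ad
    | false =>
      by_cases h : (cd.getD v 0 == 1 && (PySem.Str.len v == L)) = true
      · simp only [scanList, h, if_true]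
        exact ih false L _
      · simp only [Bool.not_eq_true] at h
        simp only [scanList, h, if_false, Bool.false_eq_true]
        exact ih false L ad

-- first.1 characterisation

lemma first_keys (goods : List String) :
    (goods.foldl (kvStep (fun g => g) subsAll) PySem.Dict.empty).keys
      = PySem.Set.ofList goods := by
  rw [loop_keys]
  have h1 : (PySem.Dict.empty : PySem.Dict String (List String)).keys = [] := rfl
  rw [h1, List.map_id', PySem.Set.ofList_eq_foldl]
  rfl

lemma enumFold_tail : ∀ (t : List String) (s : String) (j : Int), 1 ≤ j →
    (PySem.List.enumerate t j).foldl (fun s iw => if iw.1 == 0 then iw.2 else s ++ " " ++ iw.2) s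
      = t.foldl (fun s w => s ++ " " ++ w) s := by
  intro t
  induction t with
  | nil => intro s j _; rfl
  | cons x r ih =>
    intro s j hj
    rw [PySem.List.enumerate_cons]
    simp only [List.foldl_cons]
    rw [if_neg (by simp; omega)]
    exact ih _ _ (by omega)

lemma foldl_sep_join : ∀ (t : List String) (w : String),
    t.foldl (fun s w' => s ++ " " ++ w') w = PySem.Str.join " " (w :: t) := by
  intro t
  induction t with
  | nil =>
    intro w
    apply String.ext
    simp [PySem.Str.toList_join, PySem.Chars.join_singleton]
  | cons x r ih =>
    intro w
    simp only [List.foldl_cons]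
    rw [ih (w ++ " " ++ x)]
    apply String.ext
    simp only [PySem.Str.toList_join, List.map_cons]
    rw [PySem.Chars.join_cons_cons]
    cases r with
    | nil =>
      simp [PySem.Chars.join_singleton, String.toList_append]
    | cons y r' =>
      simp only [List.map_cons]
      rw [PySem.Chars.join_cons_cons, PySem.Chars.join_cons_cons]
      simp [String.toList_append]

lemma enumFold_join (ws : List String) (h : ws ≠ []) :
    (PySem.List.enumerate ws).foldl (fun s iw => if iw.1 == 0 then iw.2 else s ++ " " ++ iw.2) ""
      = PySem.Str.join " " ws := by
  cases ws with
  | nil => exact absurd rfl h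
  | cons w t =>
    rw [PySem.List.enumerate_cons]
    simp only [List.foldl_cons]
    rw [show (if (((0 : Int) == 0) = true) then w else "" ++ " " ++ w) = w from rfl]
    rw [enumFold_tail t w (0 + 1) (by norm_num)]
    exact foldl_sep_join t w

-- defeq bridges for the A port's second and third loops
def loop23 (first : PySem.Dict String (List String) × List String) : List String :=
  let counter := PySem.Dict.counter first.2
  let answer_dict := first.1.items.foldl
    (fun (ad : PySem.Dict String (List String)) gv =>
      let value := PySem.List.sorted gv.2 (fun s => PySem.Str.len s)
      let scan := (PySem.List.pyRange 0 (value.length : Int)).foldl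
        (fun (st : PySem.Dict String (List String) × Bool × Int) i =>
          let v := PySem.List.pyGetD value i ""
          if st.2.1 then
            if counter.getD v 0 == 1 then
              (st.1.modify gv.1 [] (fun w => w ++ [v]), false, PySem.Str.len v)
            else st
          else
            if counter.getD v 0 == 1 && PySem.Str.len v == st.2.2 then
              (st.1.modify gv.1 [] (fun w => w ++ [v]), st.2.1, st.2.2)
            else st)
        (ad.insert gv.1 [], true, -1)
      scan.1)
    PySem.Dict.empty
  answer_dict.items.foldl
    (fun (answer : List String) gw =>
      if gw.2.isEmpty then answer ++ ["None"]
      else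
        let fw := PySem.List.sorted (PySem.Set.ofList gw.2) (fun x => x)
        answer ++ [(PySem.List.enumerate fw).foldl
          (fun s iw => if iw.1 == 0 then iw.2 else s ++ " " ++ iw.2) ""])
    []

def loop23' (pd : PySem.Dict String (List String)) (plist : List String) : List String :=
  let counter := PySem.Dict.counter plist
  let answer_dict := pd.items.foldl
    (fun (ad : PySem.Dict String (List String)) gv =>
      let value := PySem.List.sorted gv.2 (fun s => PySem.Str.len s)
      let scan := (PySem.List.pyRange 0 (value.length : Int)).foldl
        (fun (st : PySem.Dict String (List String) × Bool × Int) i =>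
          let v := PySem.List.pyGetD value i ""
          if st.2.1 then
            if counter.getD v 0 == 1 then
              (st.1.modify gv.1 [] (fun w => w ++ [v]), false, PySem.Str.len v)
            else st
          else
            if counter.getD v 0 == 1 && PySem.Str.len v == st.2.2 then
              (st.1.modify gv.1 [] (fun w => w ++ [v]), st.2.1, st.2.2)
            else st)
        (ad.insert gv.1 [], true, -1)
      scan.1)
    PySem.Dict.empty
  answer_dict.items.foldl
    (fun (answer : List String) gw =>
      if gw.2.isEmpty then answer ++ ["None"]
      else
        let fw := PySem.List.sorted (PySem.Set.ofList gw.2) (fun x => x)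
        answer ++ [(PySem.List.enumerate fw).foldl
          (fun s iw => if iw.1 == 0 then iw.2 else s ++ " " ++ iw.2) ""])
    []

lemma solution_eq_map (goods : List String) :
    solution goods = (PySem.List.dedup goods).map (fun g => renderA (wsA (cOf goods) g)) := by
  have hnd : (goods.foldl (kvStep (fun g => g) subsAll) PySem.Dict.empty).keys.Nodup := by
    rw [first_keys]; exact PySem.Set.nodup_ofList goods
  have hitems : (goods.foldl (kvStep (fun g => g) subsAll) PySem.Dict.empty).items
      = (PySem.List.dedup goods).map (fun g => (g, subsAll g)) := by
    rw [PySem.Dict.items_eq_map_keys _ hnd [], first_keys, PySem.List.dedup_eq_ofList]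
    apply List.map_congr_left
    intro g hg
    have hgm : g ∈ goods.map (fun g => g) := by
      simpa using (PySem.Set.mem_ofList goods g).1 hg
    rw [loop_getD_mem (fun g => g) subsAll goods _ g hgm]
  have hscan : (fun (ad : PySem.Dict String (List String)) (gv : String × List String) =>
      ((PySem.List.pyRange 0 (((PySem.List.sorted gv.2 (fun s => PySem.Str.len s)).length : Int))).foldl
        (fun (st : PySem.Dict String (List String) × Bool × Int) i =>
          if st.2.1 then
            if (PySem.Dict.counter (partList goods)).getD
                (PySem.List.pyGetD (PySem.List.sorted gv.2 (fun s => PySem.Str.len s)) i "") 0 == 1 then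
              (st.1.modify gv.1 [] (fun w => w ++
                  [PySem.List.pyGetD (PySem.List.sorted gv.2 (fun s => PySem.Str.len s)) i ""]), false,
               PySem.Str.len (PySem.List.pyGetD (PySem.List.sorted gv.2 (fun s => PySem.Str.len s)) i ""))
            else st
          else
            if (PySem.Dict.counter (partList goods)).getD
                (PySem.List.pyGetD (PySem.List.sorted gv.2 (fun s => PySem.Str.len s)) i "") 0 == 1
                && PySem.Str.len (PySem.List.pyGetD (PySem.List.sorted gv.2 (fun s => PySem.Str.len s)) i "")
                   == st.2.2 then
              (st.1.modify gv.1 [] (fun w => w ++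
                  [PySem.List.pyGetD (PySem.List.sorted gv.2 (fun s => PySem.Str.len s)) i ""]), st.2.1, st.2.2)
            else st)
        (ad.insert gv.1 [], true, -1)).1)
      = (fun (ad : PySem.Dict String (List String)) (gv : String × List String) =>
          kvStep Prod.fst (fun gv => scanList (cOf goods) true (-1)
            (PySem.List.sorted gv.2 (fun s => PySem.Str.len s))) ad gv) := by
    funext ad gv
    rw [PySem.List.foldl_pyRange_zero_pyGetD' (PySem.List.sorted gv.2 (fun s => PySem.Str.len s)) ""
        (fun (st : PySem.Dict String (List String) × Bool × Int) v =>
          if st.2.1 then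
            if (PySem.Dict.counter (partList goods)).getD v 0 == 1 then
              (st.1.modify gv.1 [] (fun w => w ++ [v]), false, PySem.Str.len v)
            else st
          else
            if (PySem.Dict.counter (partList goods)).getD v 0 == 1 && PySem.Str.len v == st.2.2 then
              (st.1.modify gv.1 [] (fun w => w ++ [v]), st.2.1, st.2.2)
            else st)
        (ad.insert gv.1 [], true, -1)]
    exact scan_fold_eq (PySem.Dict.counter (partList goods)) gv.1 _ true (-1) _
  have hkv : ∀ (ad : PySem.Dict String (List String)) (g : String),
      kvStep Prod.fst (fun gv => scanList (cOf goods) true (-1)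
          (PySem.List.sorted gv.2 (fun s => PySem.Str.len s))) ad (g, subsAll g)
      = kvStep (fun g => g) (fun g => wsA (cOf goods) g) ad g := fun _ _ => rfl
  have hkeys2 : ((PySem.List.dedup goods).foldl
      (kvStep (fun g => g) (fun g => wsA (cOf goods) g)) PySem.Dict.empty).keys
      = PySem.List.dedup goods := by
    rw [loop_keys]
    rw [show (PySem.List.dedup goods).map (fun g => g) = PySem.List.dedup goods from List.map_id' _]
    rw [show (PySem.Dict.empty : PySem.Dict String (List String)).keys = ([] : List String) from rfl]
    rw [show PySem.Set.update ([] : PySem.Set String) (PySem.List.dedup goods)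
        = PySem.Set.ofList (PySem.List.dedup goods) from (PySem.Set.ofList_eq_foldl _).symm]
    exact ofList_eq_self (by rw [PySem.List.dedup_eq_ofList]; exact PySem.Set.nodup_ofList goods)
  have hitems2 : ((PySem.List.dedup goods).foldl
      (kvStep (fun g => g) (fun g => wsA (cOf goods) g)) PySem.Dict.empty).items
      = (PySem.List.dedup goods).map (fun g => (g, wsA (cOf goods) g)) := by
    rw [PySem.Dict.items_eq_map_keys _ (by rw [hkeys2]; rw [PySem.List.dedup_eq_ofList]; exact PySem.Set.nodup_ofList goods) [], hkeys2]
    apply List.map_congr_left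
    intro g hg
    rw [loop_getD_mem (fun g => g) (fun g => wsA (cOf goods) g) _ _ g (by simpa using hg)]
  have hpoint : ∀ (acc : List String), ∀ g ∈ PySem.List.dedup goods,
      (if (wsA (cOf goods) g).isEmpty then acc ++ ["None"]
       else acc ++ [(PySem.List.enumerate (PySem.List.sorted (PySem.Set.ofList (wsA (cOf goods) g)) (fun x => x))).foldl
          (fun s iw => if iw.1 == 0 then iw.2 else s ++ " " ++ iw.2) ""])
      = acc ++ [renderA (wsA (cOf goods) g)] := by
    intro acc g _
    by_cases he : (wsA (cOf goods) g).isEmpty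
    · simp [renderA, he]
    · have hne : wsA (cOf goods) g ≠ [] := by
        intro h0; rw [h0] at he; exact he rfl
      obtain ⟨w, hw⟩ := List.exists_mem_of_ne_nil _ hne
      have hof : PySem.Set.ofList (wsA (cOf goods) g) ≠ [] :=
        List.ne_nil_of_mem ((PySem.Set.mem_ofList _ _).2 hw)
      have hsne : PySem.List.sorted (PySem.Set.ofList (wsA (cOf goods) g)) (fun x => x) ≠ [] := by
        intro h0
        exact hof ((PySem.List.sorted_eq_nil_iff _ _ _).1 h0)
      rw [enumFold_join _ hsne]
      simp [renderA, he]
  have h0 : solution goods = loop23 (goods.foldl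
      (fun (st : PySem.Dict String (List String) × List String) good =>
        (((PySem.List.pyRange 0 (PySem.Str.len good)).foldl
          (fun (st2 : PySem.Dict String (List String) × List String) i =>
            (PySem.List.pyRange (i + 1) (PySem.Str.len good + 1)).foldl
              (fun (st3 : PySem.Dict String (List String) × List String) k =>
                (st3.1.modify good [] (fun v => v ++ [PySem.Str.slice good (some i) (some k)]),
                 if st3.2.contains (PySem.Str.slice good (some i) (some k)) then st3.2
                 else st3.2 ++ [PySem.Str.slice good (some i) (some k)]))
              st2)
          (st.1.insert good [], [])).1,
         st.2 ++ ((PySem.List.pyRange 0 (PySem.Str.len good)).foldl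
          (fun (st2 : PySem.Dict String (List String) × List String) i =>
            (PySem.List.pyRange (i + 1) (PySem.Str.len good + 1)).foldl
              (fun (st3 : PySem.Dict String (List String) × List String) k =>
                (st3.1.modify good [] (fun v => v ++ [PySem.Str.slice good (some i) (some k)]),
                 if st3.2.contains (PySem.Str.slice good (some i) (some k)) then st3.2
                 else st3.2 ++ [PySem.Str.slice good (some i) (some k)]))
              st2)
          (st.1.insert good [], [])).2))
      (PySem.Dict.empty, [])) := rfl
  rw [h0, outer_split]
  have h1 : loop23 ((goods.foldl (kvStep (fun g => g) subsAll) PySem.Dict.empty),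
        ([] : List String) ++ goods.flatMap (fun g => PySem.Set.ofList (subsAll g)))
      = loop23' (goods.foldl (kvStep (fun g => g) subsAll) PySem.Dict.empty) (partList goods) := rfl
  rw [h1]
  unfold loop23'
  dsimp only
  rw [hitems]
  rw [hscan]
  rw [List.foldl_map]
  simp only [hkv]
  rw [hitems2, List.foldl_map]
  dsimp only
  rw [PySem.List.foldl_congr_mem (PySem.List.dedup goods) _
      (fun answer g => answer ++ [renderA (wsA (cOf goods) g)]) [] (by
        intro acc g hg
        exact hpoint acc g hg)]
  rw [PySem.List.foldl_append_singleton_eq_map, List.nil_append]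

-- ---- port B restructuring ----

lemma solution_alt_eq_map (goods : List String) :
    solution_alt goods =
      (PySem.List.dedup goods).map (fun g => searchB (cAlt goods) g) := by
  unfold solution_alt
  rw [show (fun (answer : List String) good =>
      let n := PySem.Str.len good
      answer ++ [((PySem.List.pyRange 1 (n + 1)).foldl
        (fun (st : String × Bool) L =>
          if st.2 then st
          else
            let uniq := (PySem.List.pyRange 0 (n - L + 1)).foldl
              (fun se i =>
                if (goods.foldl (fun acc h =>
                      if PySem.Str.isIn (PySem.Str.slice good (some i) (some (i + L))) h
                      then acc + 1 else acc) (0 : Int)) == 1 then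
                  PySem.Set.add se (PySem.Str.slice good (some i) (some (i + L)))
                else se)
              PySem.Set.empty
            if uniq.isEmpty then st
            else (PySem.Str.join " " (PySem.List.sorted uniq (fun x => x)), true))
        ("None", false)).1])
      = (fun answer good => answer ++ [searchB (cAlt goods) good]) from rfl]
  rw [PySem.List.foldl_append_singleton_eq_map, List.nil_append]

-- ---- substring membership facts ----

lemma len_nonneg (g : String) : 0 ≤ PySem.Str.len g := by
  rw [PySem.Str.len_eq]; positivity

lemma len_slice (g : String) (i k : Int) (h0 : 0 ≤ i) (hik : i ≤ k) (hk : k ≤ PySem.Str.len g) :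
    PySem.Str.len (PySem.Str.slice g (some i) (some k)) = k - i := by
  rw [PySem.Str.len_eq] at *
  rw [show (PySem.Str.slice g (some i) (some k)).toList.length
      = (PySem.Chars.slice g.toList (some i) (some k)).length by rw [PySem.Str.toList_slice]]
  rw [PySem.Chars.slice_eq_listSlice, PySem.List.slice_toNat g.toList h0 (by omega)]
  simp only [List.length_take, List.length_drop]
  omega

lemma mem_subsAll_iff (g : String) (s : String) :
    s ∈ subsAll g ↔ ∃ i k : Int, 0 ≤ i ∧ i < k ∧ k ≤ PySem.Str.len g ∧
      s = PySem.Str.slice g (some i) (some k) := by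
  unfold subsAll
  simp only [List.mem_flatMap, List.mem_map, PySem.List.mem_pyRange_one]
  constructor
  · rintro ⟨i, ⟨h0, hn⟩, k, ⟨hk1, hk2⟩, rfl⟩
    exact ⟨i, k, h0, by omega, by omega, rfl⟩
  · rintro ⟨i, k, h0, hik, hk, rfl⟩
    exact ⟨i, ⟨h0, by omega⟩, k, ⟨by omega, by omega⟩, rfl⟩

lemma mem_subsLen_iff (g : String) (L : Int) (s : String) :
    s ∈ subsLen g L ↔ ∃ i : Int, 0 ≤ i ∧ i ≤ PySem.Str.len g - L ∧
      s = PySem.Str.slice g (some i) (some (i + L)) := by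
  unfold subsLen
  simp only [List.mem_map, PySem.List.mem_pyRange_one]
  constructor
  · rintro ⟨i, ⟨h0, hi⟩, rfl⟩
    exact ⟨i, h0, by omega, rfl⟩
  · rintro ⟨i, h0, hi, rfl⟩
    exact ⟨i, ⟨h0, by omega⟩, rfl⟩

lemma mem_subsLen_iff' (g : String) (L : Int) (hL : 1 ≤ L) (s : String) :
    s ∈ subsLen g L ↔ s ∈ subsAll g ∧ PySem.Str.len s = L := by
  rw [mem_subsLen_iff, mem_subsAll_iff]
  constructor
  · rintro ⟨i, h0, hi, rfl⟩
    refine ⟨⟨i, i + L, h0, by omega, by omega, rfl⟩, ?_⟩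
    rw [len_slice g i (i + L) h0 (by omega) (by omega)]
    omega
  · rintro ⟨⟨i, k, h0, hik, hk, rfl⟩, hlen⟩
    rw [len_slice g i k h0 (by omega) hk] at hlen
    exact ⟨i, h0, by omega, by rw [show i + L = k by omega]⟩

lemma len_of_mem_subsAll (g : String) (s : String) (h : s ∈ subsAll g) :
    1 ≤ PySem.Str.len s ∧ PySem.Str.len s ≤ PySem.Str.len g := by
  rcases (mem_subsAll_iff g s).1 h with ⟨i, k, h0, hik, hk, rfl⟩
  rw [len_slice g i k h0 (by omega) hk]
  omega

lemma slice_toList_take_drop (g : String) (i k : Int) (h0 : 0 ≤ i) (hik : i ≤ k) :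
    (PySem.Str.slice g (some i) (some k)).toList
      = (g.toList.drop i.toNat).take (k.toNat - i.toNat) := by
  rw [PySem.Str.toList_slice, PySem.Chars.slice_eq_listSlice,
      PySem.List.slice_toNat g.toList h0 (by omega)]

-- s ∈ subsAll h ↔ 's in h' (Python containment), for nonempty s
lemma mem_subsAll_iff_isIn (h s : String) (hs : 1 ≤ PySem.Str.len s) :
    s ∈ subsAll h ↔ PySem.Str.isIn s h = true := by
  rw [PySem.Str.isIn_eq, PySem.Chars.isIn_iff_infix]
  constructor
  · intro hm
    rcases (mem_subsAll_iff h s).1 hm with ⟨i, k, h0, hik, hk, rfl⟩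
    rw [slice_toList_take_drop h i k h0 (by omega)]
    exact ((h.toList.drop i.toNat).take_prefix (k.toNat - i.toNat)).isInfix.trans
      (h.toList.drop_suffix i.toNat).isInfix
  · rintro ⟨t, e, heq⟩
    have hsne : s.toList.length ≠ 0 := by
      rw [PySem.Str.len_eq] at hs; omega
    refine (mem_subsAll_iff h s).2 ⟨(t.length : Int), (t.length : Int) + (s.toList.length : Int),
      by positivity, by omega, ?_, ?_⟩
    · have : h.toList.length = t.length + s.toList.length + e.length := by
        rw [← heq]; simp; omega
      rw [PySem.Str.len_eq, this]
      push_cast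
      omega
    · apply String.ext
      rw [slice_toList_take_drop h _ _ (by positivity) (by omega)]
      have h1 : ((t.length : Int)).toNat = t.length := by omega
      have h2 : (((t.length : Int) + (s.toList.length : Int))).toNat
          = t.length + s.toList.length := by omega
      rw [h1, h2, ← heq, List.append_assoc, List.drop_left,
          show t.length + s.toList.length - t.length = s.toList.length by omega,
          List.take_left]

-- ---- the two counting mechanisms agree on nonempty strings ----

lemma count_ofList_subsAll (h s : String) (hs : 1 ≤ PySem.Str.len s) :
    (PySem.Set.ofList (subsAll h)).count s
      = if PySem.Str.isIn s h then 1 else 0 := by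
  by_cases hm : s ∈ subsAll h
  · rw [if_pos ((mem_subsAll_iff_isIn h s hs).1 hm)]
    exact List.count_eq_one_of_mem (PySem.Set.nodup_ofList _) ((PySem.Set.mem_ofList _ _).2 hm)
  · rw [if_neg (by
      intro hin
      exact hm ((mem_subsAll_iff_isIn h s hs).2 hin))]
    exact List.count_eq_zero_of_not_mem (fun hx => hm ((PySem.Set.mem_ofList _ _).1 hx))

lemma c_agree (goods : List String) (s : String) (hs : 1 ≤ PySem.Str.len s) :
    cOf goods s = cAlt goods s := by
  unfold cOf cAlt
  rw [PySem.Dict.getD_counter, PySem.List.foldl_if_add_one, Int.zero_add]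
  unfold partList
  congr 1
  induction goods with
  | nil => rfl
  | cons g t ih =>
    rw [List.flatMap_cons, List.count_append, List.countP_cons, ih,
        count_ofList_subsAll g s hs]
    exact Nat.add_comm _ _

-- ---- scan characterisation ----

lemma scanList_false (c : String → Int) (L : Int) (vs : List String) :
    scanList c false L vs = vs.filter (fun v => c v == 1 && PySem.Str.len v == L) := by
  induction vs with
  | nil => rfl
  | cons v r ih =>
    by_cases h : (c v == 1 && (PySem.Str.len v == L)) = true
    · simp [scanList, List.filter_cons, ih]
    · simp only [Bool.not_eq_true] at h
      simp [scanList, List.filter_cons, ih]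

lemma scanList_true (c : String → Int) (L : Int) (vs : List String) :
    scanList c true L vs =
      match vs.filter (fun v => c v == 1) with
      | [] => []
      | h :: t => (h :: t).filter (fun v => PySem.Str.len v == PySem.Str.len h) := by
  induction vs generalizing L with
  | nil => rfl
  | cons v r ih =>
    by_cases h : (c v == 1) = true
    · simp only [scanList, h, if_true, List.filter_cons, scanList_false]
      simp only [beq_self_eq_true, if_true]
      rw [List.filter_filter]
      exact congrArg _ (List.filter_congr (fun a _ => by rw [Bool.and_comm]))
    · simp only [Bool.not_eq_true] at h
      rw [show scanList c true L (v :: r) = scanList c true L r from by simp [scanList, h]]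
      rw [show List.filter (fun v => c v == 1) (v :: r) = List.filter (fun v => c v == 1) r from by
        simp [h]]
      exact ih L

-- ---- uniq characterisation ----

lemma uniqList_eq (c : String → Int) (g : String) (L : Int) :
    uniqList c g L = (subsLen g L).foldl
      (fun se x => if c x == 1 then PySem.Set.add se x else se) [] := by
  unfold uniqList subsLen
  rw [List.foldl_map]
  rfl

lemma mem_foldl_cond_add (c : String → Int) :
    ∀ (l : List String) (init : PySem.Set String) (s : String),
    (s ∈ l.foldl (fun se x => if c x == 1 then PySem.Set.add se x else se) init) ↔
      s ∈ init ∨ (s ∈ l ∧ c s = 1) := by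
  intro l
  induction l with
  | nil => intro init s; simp
  | cons x t ih =>
    intro init s
    simp only [List.foldl_cons]
    by_cases h : (c x == 1) = true
    · have hcx : c x = 1 := by simpa using h
      rw [if_pos h, ih]
      constructor
      · rintro (hs | ⟨hm, hc⟩)
        · rcases (PySem.Set.mem_add init x s).1 hs with hs' | rfl
          · exact Or.inl hs'
          · exact Or.inr ⟨by simp, hcx⟩
        · exact Or.inr ⟨by simp [hm], hc⟩
      · rintro (hs | ⟨hm, hc⟩)
        · exact Or.inl ((PySem.Set.mem_add init x s).2 (Or.inl hs))
        · rcases List.mem_cons.1 hm with rfl | hm'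
          · exact Or.inl ((PySem.Set.mem_add init s s).2 (Or.inr rfl))
          · exact Or.inr ⟨hm', hc⟩
    · have hcx : ¬ c x = 1 := by simpa using h
      rw [if_neg h, ih]
      constructor
      · rintro (hs | ⟨hm, hc⟩)
        · exact Or.inl hs
        · exact Or.inr ⟨List.mem_cons_of_mem _ hm, hc⟩
      · rintro (hs | ⟨hm, hc⟩)
        · exact Or.inl hs
        · rcases List.mem_cons.1 hm with rfl | hm'
          · exact absurd hc hcx
          · exact Or.inr ⟨hm', hc⟩

lemma nodup_foldl_cond_add (c : String → Int) :
    ∀ (l : List String) (init : PySem.Set String), init.Nodup →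
    (l.foldl (fun se x => if c x == 1 then PySem.Set.add se x else se) init).Nodup := by
  intro l
  induction l with
  | nil => intro init h; exact h
  | cons x t ih =>
    intro init h
    simp only [List.foldl_cons]
    by_cases hx : (c x == 1) = true
    · rw [if_pos hx]; exact ih _ (PySem.Set.nodup_add init x h)
    · rw [if_neg hx]; exact ih _ h

lemma mem_uniqList (c : String → Int) (g : String) (L : Int) (s : String) :
    s ∈ uniqList c g L ↔ s ∈ subsLen g L ∧ c s = 1 := by
  rw [uniqList_eq, mem_foldl_cond_add]
  simp

lemma nodup_uniqList (c : String → Int) (g : String) (L : Int) : (uniqList c g L).Nodup := by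
  rw [uniqList_eq]
  exact nodup_foldl_cond_add c _ [] List.nodup_nil

-- ---- congruence: the search depends on c only through subsAll g ----

lemma uniqList_congr (c c' : String → Int) (g : String) (L : Int) (hL : 1 ≤ L)
    (h : ∀ s ∈ subsAll g, c s = c' s) : uniqList c g L = uniqList c' g L := by
  rw [uniqList_eq, uniqList_eq]
  apply PySem.List.foldl_congr_mem
  intro se x hx
  rw [h x ((mem_subsLen_iff' g L hL x).1 hx).1]

lemma searchB_congr (c c' : String → Int) (g : String)
    (h : ∀ s ∈ subsAll g, c s = c' s) : searchB c g = searchB c' g := by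
  unfold searchB
  rw [PySem.List.foldl_congr_mem (PySem.List.pyRange 1 (PySem.Str.len g + 1))
      (searchBody c g) (searchBody c' g) ("None", false) (by
        intro st L hL
        have hL1 : 1 ≤ L := (PySem.List.mem_pyRange_one.1 hL).1
        unfold searchBody
        rw [uniqList_congr c c' g L hL1 h])]

-- ---- search fold behaviour ----

lemma search_stays_done (c : String → Int) (g : String) (l : List Int) (st : String × Bool)
    (h : st.2 = true) : l.foldl (searchBody c g) st = st := by
  induction l with
  | nil => rfl
  | cons x t ih => simp only [List.foldl_cons, searchBody, h, if_true]; exact ih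

lemma search_skips (c : String → Int) (g : String) (l : List Int) (st : String × Bool)
    (h : ∀ L ∈ l, (uniqList c g L).isEmpty) : l.foldl (searchBody c g) st = st := by
  induction l generalizing st with
  | nil => rfl
  | cons x t ih =>
    simp only [List.foldl_cons]
    have hb : searchBody c g st x = st := by
      unfold searchBody
      by_cases hd : st.2
      · rw [if_pos hd]
      · rw [if_neg hd, if_pos (h x (by simp))]
    rw [hb]
    exact ih _ (fun L hL => h L (List.mem_cons_of_mem _ hL))

-- ---- the per-good equivalence ----

lemma perGood (c : String → Int) (g : String) : renderA (wsA c g) = searchB c g := by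
  have hn0 : 0 ≤ PySem.Str.len g := len_nonneg g
  unfold renderA searchB wsA
  rw [scanList_true]
  cases hf : (PySem.List.sorted (subsAll g) (fun s => PySem.Str.len s)).filter (fun v => c v == 1) with
  | nil =>
    have hnohit : ∀ s ∈ subsAll g, ¬ c s = 1 := by
      intro s hs hc
      have hmem : s ∈ (PySem.List.sorted (subsAll g) (fun s => PySem.Str.len s)).filter (fun v => c v == 1) := by
        rw [List.mem_filter]
        exact ⟨(PySem.List.mem_sorted _ _ _ s).2 hs, by simpa using hc⟩
      rw [hf] at hmem
      simp at hmem
    rw [search_skips c g (PySem.List.pyRange 1 (PySem.Str.len g + 1)) ("None", false) ?hskip]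
    case hskip =>
      intro L hL
      rw [List.isEmpty_iff]
      by_contra hne
      rcases List.exists_mem_of_ne_nil _ hne with ⟨s, hs⟩
      rcases (mem_uniqList c g L s).1 hs with ⟨hsl, hc1⟩
      have hL1 : 1 ≤ L := (PySem.List.mem_pyRange_one.1 hL).1
      exact hnohit s ((mem_subsLen_iff' g L hL1 s).1 hsl).1 hc1
    simp
  | cons h t =>
    have hred : (match h :: t with
        | [] => ([] : List String)
        | h :: t => (h :: t).filter (fun v => PySem.Str.len v == PySem.Str.len h))
        = (h :: t).filter (fun v => PySem.Str.len v == PySem.Str.len h) := rfl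
    rw [hred]
    have hh : (h ∈ PySem.List.sorted (subsAll g) (fun s => PySem.Str.len s)) ∧ c h = 1 := by
      have := List.mem_filter.1 (hf ▸ List.mem_cons_self (l := t))
      exact ⟨this.1, by simpa using this.2⟩
    have hhs : h ∈ subsAll g := (PySem.List.mem_sorted _ _ _ h).1 hh.1
    set L0 := PySem.Str.len h with hL0
    have hb : 1 ≤ L0 ∧ L0 ≤ PySem.Str.len g := len_of_mem_subsAll g h hhs
    have hmin : ∀ v ∈ subsAll g, c v = 1 → L0 ≤ PySem.Str.len v := by
      intro v hv hcv
      rcases List.filter_eq_cons_iff.1 hf with ⟨l1, l2, hveq, hl1, _, hl2⟩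
      have hvmem : v ∈ PySem.List.sorted (subsAll g) (fun s => PySem.Str.len s) :=
        (PySem.List.mem_sorted _ _ _ v).2 hv
      rw [hveq] at hvmem
      rcases List.mem_append.1 hvmem with hv1 | hv2
      · exact absurd (by simpa using hcv) (hl1 v hv1)
      · rcases List.mem_cons.1 hv2 with rfl | hv3
        · exact le_refl _
        · have hpw := PySem.List.sorted_pairwise (subsAll g) (fun s => PySem.Str.len s)
          rw [hveq] at hpw
          exact (List.pairwise_cons.1 (List.pairwise_append.1 hpw).2.1).1 v hv3
    have hws : ∀ s, s ∈ (h :: t).filter (fun v => PySem.Str.len v == L0) ↔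
        (s ∈ subsAll g ∧ c s = 1 ∧ PySem.Str.len s = L0) := by
      intro s
      rw [← hf, List.filter_filter, List.mem_filter]
      simp only [Bool.and_eq_true, beq_iff_eq]
      constructor
      · rintro ⟨hsm, hp⟩
        exact ⟨(PySem.List.mem_sorted _ _ _ s).1 hsm, hp.2, hp.1⟩
      · rintro ⟨hsa, hc1, hlen⟩
        exact ⟨(PySem.List.mem_sorted _ _ _ s).2 hsa, hlen, hc1⟩
    have huniq : ∀ s, s ∈ uniqList c g L0 ↔ (s ∈ subsAll g ∧ c s = 1 ∧ PySem.Str.len s = L0) := by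
      intro s
      rw [mem_uniqList, mem_subsLen_iff' g L0 hb.1]
      tauto
    have hsplit : PySem.List.pyRange 1 (PySem.Str.len g + 1)
        = PySem.List.pyRange 1 L0 ++ PySem.List.pyRange L0 (PySem.Str.len g + 1) :=
      PySem.List.pyRange_one_append 1 L0 (PySem.Str.len g + 1) hb.1 (by omega)
    have hskip1 : ∀ L ∈ PySem.List.pyRange 1 L0, (uniqList c g L).isEmpty = true := by
      intro L hL
      rcases PySem.List.mem_pyRange_one.1 hL with ⟨hL1, hL2⟩
      rw [List.isEmpty_iff]
      by_contra hne
      rcases List.exists_mem_of_ne_nil _ hne with ⟨s, hs⟩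
      rcases (mem_uniqList c g L s).1 hs with ⟨hsl, hc1⟩
      rcases (mem_subsLen_iff' g L hL1 s).1 hsl with ⟨hsa, hlen⟩
      have := hmin s hsa hc1
      omega
    rw [hsplit, List.foldl_append,
        search_skips c g (PySem.List.pyRange 1 L0) ("None", false) hskip1,
        PySem.List.pyRange_one_cons (show L0 < PySem.Str.len g + 1 by omega), List.foldl_cons]
    have hne0 : uniqList c g L0 ≠ [] :=
      List.ne_nil_of_mem ((huniq h).2 ⟨hhs, hh.2, rfl⟩)
    have hu_ne : (uniqList c g L0).isEmpty = false := by
      cases hcase : uniqList c g L0 with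
      | nil => exact absurd hcase hne0
      | cons a b => rfl
    have hstep : searchBody c g ("None", false) L0
        = (PySem.Str.join " " (PySem.List.sorted (uniqList c g L0) (fun x => x)), true) := by
      unfold searchBody
      rw [if_neg (by simp), if_neg (by simp [hu_ne])]
    rw [hstep, search_stays_done c g _ _ rfl]
    have hhf : h ∈ (h :: t).filter (fun v => PySem.Str.len v == L0) :=
      List.mem_filter.2 ⟨List.mem_cons_self, by simp [hL0]⟩
    have hwsne : ((h :: t).filter (fun v => PySem.Str.len v == L0)).isEmpty = false := by
      cases hcase : (h :: t).filter (fun v => PySem.Str.len v == L0) with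
      | nil => exact absurd hcase (List.ne_nil_of_mem hhf)
      | cons a b => rfl
    rw [show (if ((h :: t).filter (fun v => PySem.Str.len v == L0)).isEmpty then "None"
        else PySem.Str.join " " (PySem.List.sorted
          (PySem.Set.ofList ((h :: t).filter (fun v => PySem.Str.len v == L0))) (fun x => x)))
        = PySem.Str.join " " (PySem.List.sorted
          (PySem.Set.ofList ((h :: t).filter (fun v => PySem.Str.len v == L0))) (fun x => x)) from by
      rw [if_neg (by rw [hwsne]; exact Bool.false_ne_true)]]
    have hperm : (PySem.Set.ofList ((h :: t).filter (fun v => PySem.Str.len v == L0))).Perm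
        (uniqList c g L0) := by
      rw [List.perm_ext_iff_of_nodup (PySem.Set.nodup_ofList _) (nodup_uniqList c g L0)]
      intro s
      rw [PySem.Set.mem_ofList, hws s, huniq s]
    rw [(PySem.List.sorted_id_eq_sorted_id_iff_perm _ _).2 hperm]

-- ===== VERDICT (by name: the statement is the Claim_ definition above) =====
theorem solution_spec : Claim_equal_solution := by
  intro goods _
  unfold Spec_solution
  rw [solution_eq_map, solution_alt_eq_map]
  apply List.map_congr_left
  intro g _
  rw [perGood (cOf goods) g]
  exact searchB_congr (cOf goods) (cAlt goods) g
    (fun s hs => c_agree goods s (len_of_mem_subsAll g s hs).1)
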